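-- pv_equiv track=rewrite | github.com/over958999-byte/King99 | gui/account_tab.py | _split_by_repeated_key
-- ===== SOURCE A (Python) =====
-- def _split_by_repeated_key(text: str, key: str) -> list[str]:
--     """当一组文本内出现多次同一关键字时，按该关键字拆分为多组。"""
--     lines = text.splitlines()
--     groups = []
--     current = []
--     key_lower = key.lower()
--     for line in lines:
--         stripped = line.strip().lower()
--         # 检测该行是否以 "key:" 或 "key :" 开头
--         if stripped.startswith(key_lower) and ':' in stripped:
--             before_colon = stripped.split(':', 1)[0].strip()
--             if before_colon == key_lower and current:
--                 # 遇到重复的 key，把之前的行作为一组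
--                 groups.append('\n'.join(current))
--                 current = []
--         current.append(line)
--     if current:
--         groups.append('\n'.join(current))
--     return groups
-- ===== SOURCE B (Python) =====
-- def _is_key_line(line, key_lower):
--     stripped = line.strip().lower()
--     return (stripped.startswith(key_lower) and ':' in stripped
--             and stripped.split(':', 1)[0].strip() == key_lower)
--
--
-- def _split_by_repeated_key(text: str, key: str) -> list[str]:
--     """Slice-and-recurse decomposition: find the next key line, cut the
--     segment off in one piece, and continue on the remainder."""
--     lines = text.splitlines()
--     key_lower = key.lower()
--     groups = []
--     while lines:
--         rest = lines[1:]
--         n = 0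
--         for line in rest:
--             if _is_key_line(line, key_lower):
--                 break
--             n += 1
--         groups.append('\n'.join(lines[:n + 1]))
--         lines = rest[n:]
--     return groups
-- ===== Notes on version B (the rewrite author's own statement) =====
-- stated objective: alternative
-- what changed: Replaced A's single accumulator loop carrying (groups, current) and a post-loop flush with a slice-and-recurse decomposition: repeatedly scan for the next key line, emit the whole segment lines[:n+1] in one join, and continue on the remainder.
import Mathlib
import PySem

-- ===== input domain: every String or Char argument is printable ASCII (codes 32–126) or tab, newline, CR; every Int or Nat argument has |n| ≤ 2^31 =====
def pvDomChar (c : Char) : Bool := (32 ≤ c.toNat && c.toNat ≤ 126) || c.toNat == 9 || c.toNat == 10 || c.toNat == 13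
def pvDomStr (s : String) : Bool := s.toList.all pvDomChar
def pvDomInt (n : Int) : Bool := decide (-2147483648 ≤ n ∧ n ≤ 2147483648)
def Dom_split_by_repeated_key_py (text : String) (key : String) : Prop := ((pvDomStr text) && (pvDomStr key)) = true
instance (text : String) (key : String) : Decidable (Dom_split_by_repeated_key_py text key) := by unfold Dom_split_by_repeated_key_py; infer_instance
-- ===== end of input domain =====

-- B replaces A's running (groups, current) accumulator loop by a slice-and-recurse
-- decomposition (find next key line, emit the segment in one piece, recurse); same cost.


-- ===== PORT A =====
-- Python locals of A's loop body, as named helpers: stripped = line.strip().lower(),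
-- before_colon = stripped.split(':', 1)[0].strip() (split with sep ":" never yields an
-- empty list, so the [0] indexing is exact as headD)
def strippedOf (line : String) : String := PySem.Str.lower (PySem.Str.strip line)
def beforeColonOf (stripped : String) : String :=
  PySem.Str.strip (((PySem.Str.splitMax? stripped ":" 1).getD []).headD "")

-- one iteration of A's for-loop over the state (groups, current)
def stepA (keyLower : String) (st : List String × List String) (line : String) :
    List String × List String :=
  if PySem.Str.startswith (strippedOf line) keyLower &&
      PySem.Str.isIn ":" (strippedOf line) then
    if beforeColonOf (strippedOf line) == keyLower && !st.2.isEmpty then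
      (st.1 ++ [PySem.Str.join "\n" st.2], [] ++ [line])
    else (st.1, st.2 ++ [line])
  else (st.1, st.2 ++ [line])

def split_by_repeated_key_py (text : String) (key : String) : List String :=
  let st := (PySem.Str.splitlines text).foldl (stepA (PySem.Str.lower key)) ([], [])
  if !st.2.isEmpty then st.1 ++ [PySem.Str.join "\n" st.2] else st.1

-- ===== PORT B =====
def isKeyLine (line : String) (keyLower : String) : Bool :=
  PySem.Str.startswith (strippedOf line) keyLower &&
    PySem.Str.isIn ":" (strippedOf line) &&
    beforeColonOf (strippedOf line) == keyLower

-- B's inner for/break loop: number of leading non-key lines of rest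
def countNonKey (keyLower : String) : List String → Nat
  | [] => 0
  | l :: rest => if isKeyLine l keyLower then 0 else countNonKey keyLower rest + 1

-- B's outer while loop (lines[:n+1] / rest[n:] are exact as take/drop: both indices ≥ 0)
def splitRecB (keyLower : String) : List String → List String
  | [] => []
  | head :: rest =>
    PySem.Str.join "\n" ((head :: rest).take (countNonKey keyLower rest + 1)) ::
      splitRecB keyLower (rest.drop (countNonKey keyLower rest))
termination_by ls => ls.length
decreasing_by simp

def split_by_repeated_key_py_alt (text : String) (key : String) : List String :=
  splitRecB (PySem.Str.lower key) (PySem.Str.splitlines text)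

-- ===== PRECONDITION & SPEC =====
def Spec_split_by_repeated_key_py (text : String) (key : String) (out : List String) : Prop := out = split_by_repeated_key_py_alt text key
instance (text : String) (key : String) (out : List String) : Decidable (Spec_split_by_repeated_key_py text key out) := by unfold Spec_split_by_repeated_key_py; infer_instance

-- ===== CLAIM (what is proved, stated in full; the proofs are below) =====
def Claim_equal_split_by_repeated_key_py : Prop := ∀ (text : String) (key : String), Dom_split_by_repeated_key_py text key → Spec_split_by_repeated_key_py text key (split_by_repeated_key_py text key)

-- ===== LEMMAS AND PROOFS =====

theorem splitRecB_nil (keyLower : String) : splitRecB keyLower [] = [] := by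
  rw [splitRecB.eq_def]

theorem splitRecB_cons (keyLower head : String) (rest : List String) :
    splitRecB keyLower (head :: rest) =
      PySem.Str.join "\n" ((head :: rest).take (countNonKey keyLower rest + 1)) ::
        splitRecB keyLower (rest.drop (countNonKey keyLower rest)) := by
  rw [splitRecB.eq_def]

-- A's nested test, with current known nonempty, is exactly B's key-line predicate
theorem stepA_of_nonempty (keyLower : String) (g cur : List String) (line : String)
    (h : cur ≠ []) :
    stepA keyLower (g, cur) line =
      if isKeyLine line keyLower then
        (g ++ [PySem.Str.join "\n" cur], [line])
      else (g, cur ++ [line]) := by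
  have hne : cur.isEmpty = false := by simpa [List.isEmpty_iff] using h
  unfold stepA isKeyLine
  cases hb1 : PySem.Str.startswith (strippedOf line) keyLower <;>
    cases hb2 : PySem.Str.isIn ":" (strippedOf line) <;>
    cases hb3 : beforeColonOf (strippedOf line) == keyLower <;>
    simp only [hb1, hb2, hb3, hne, Bool.true_and, Bool.false_and, Bool.and_true,
      Bool.and_false, Bool.and_self, Bool.not_false, if_true, if_false,
      Bool.false_eq_true, Bool.true_eq_false, ite_self, List.append_nil, List.nil_append]

-- loop invariant: from a nonempty current, A's remaining loop + final flush yields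
-- the groups so far ++ (current's segment completed, then B's split of the remainder)
theorem foldl_stepA_eq (keyLower : String) (rest : List String) :
    ∀ (g cur : List String), cur ≠ [] →
      (rest.foldl (stepA keyLower) (g, cur)).2 ≠ [] ∧
      (rest.foldl (stepA keyLower) (g, cur)).1 ++
          [PySem.Str.join "\n" (rest.foldl (stepA keyLower) (g, cur)).2] =
        g ++ (PySem.Str.join "\n" (cur ++ rest.take (countNonKey keyLower rest)) ::
              splitRecB keyLower (rest.drop (countNonKey keyLower rest))) := by
  induction rest with
  | nil => intro g cur h; exact ⟨h, by simp [countNonKey, splitRecB_nil]⟩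
  | cons l rs ih =>
    intro g cur h
    rw [List.foldl_cons, stepA_of_nonempty keyLower g cur l h]
    by_cases hk : isKeyLine l keyLower = true
    · rw [if_pos hk]
      obtain ⟨h1, h2⟩ := ih (g ++ [PySem.Str.join "\n" cur]) [l] (by simp)
      refine ⟨h1, ?_⟩
      rw [h2, countNonKey, if_pos hk]
      simp [splitRecB_cons]
    · rw [if_neg hk]
      obtain ⟨h1, h2⟩ := ih g (cur ++ [l]) (by simp)
      refine ⟨h1, ?_⟩
      rw [h2, countNonKey, if_neg hk]
      simp

theorem splitA_eq_splitB (keyLower : String) (lines : List String) :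
    (if !(lines.foldl (stepA keyLower) ([], [])).2.isEmpty then
       (lines.foldl (stepA keyLower) ([], [])).1 ++
         [PySem.Str.join "\n" (lines.foldl (stepA keyLower) ([], [])).2]
     else (lines.foldl (stepA keyLower) ([], [])).1) =
      splitRecB keyLower lines := by
  cases lines with
  | nil => simp [splitRecB_nil]
  | cons l0 rest =>
    rw [List.foldl_cons]
    have hstep : stepA keyLower ([], []) l0 = ([], [l0]) := by
      unfold stepA; simp
    rw [hstep]
    obtain ⟨h1, h2⟩ := foldl_stepA_eq keyLower rest [] [l0] (by simp)
    have hne : (rest.foldl (stepA keyLower) ([], [l0])).2.isEmpty = false := by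
      simpa [List.isEmpty_iff] using h1
    rw [hne, splitRecB_cons]
    simpa using h2

-- ===== VERDICT (by name: the statement is the Claim_ definition above) =====
theorem split_by_repeated_key_py_spec : Claim_equal_split_by_repeated_key_py := by
  intro text key _
  unfold Spec_split_by_repeated_key_py split_by_repeated_key_py split_by_repeated_key_py_alt
  exact splitA_eq_splitB (PySem.Str.lower key) (PySem.Str.splitlines text)
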